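-- pv_equiv track=rewrite | github.com/Exr17/Eric-XU-Python-codes | TD1.py | Test2
-- ===== SOURCE A (Python) =====
-- def Test(Tirage,Mot):
--     L=Tirage.copy() # Je vais ici un .copy() pour ne pas modifier la liste Tirage lorsque je modifie L
--      # En testant sur toutes les lettres du mot.
--     for k in Mot:
--         if k not in L:
--             return(False)# Lettre non valide
--         L.remove(k) # J'enlève la lettre utilisée
--     return(True)
--
-- def Test2(Tirage,Mot):
--       # Cas sans joker
--     if '?' not in Tirage:
--         return(Test(Tirage,Mot))
--     L=Tirage.copy()
--     comptage=0
--     for k in Mot: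
--
--         if k in L:
--             L.remove(k) # On retire les lettres qui marchent
--         else:
--             comptage+=1# On ajoute 1 si une lettre est manquante
--              # On autorise une seule et unique lettre manquante (remplacée par le joker)
--     if comptage<=1:
--         return(True)
--     return(False)
-- ===== SOURCE B (Python) =====
-- def Test2(Tirage, Mot):
--     # Sort-then-merge: two-pointer pass over sorted copies counts the multiset
--     # intersection; the word is formable iff the unmatched count fits the joker allowance.
--     draw = sorted(Tirage)
--     word = sorted(Mot)
--     i = j = matched = 0
--     while i < len(draw) and j < len(word):
--         if draw[i] == word[j]:
--             matched += 1
--             i += 1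
--             j += 1
--         elif draw[i] < word[j]:
--             i += 1
--         else:
--             j += 1
--     return len(Mot) - matched <= (1 if '?' in Tirage else 0)
-- ===== Notes on version B (the rewrite author's own statement) =====
-- stated objective: faster
-- what changed: Replaces A's two remove-loop paths (membership test + list.remove scan per letter, with a separate early-return path when there is no joker) by sorting copies of Tirage and Mot once and counting the multiset intersection with a single two-pointer merge pass, then comparing the miss count against the joker allowance.
import Mathlib
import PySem

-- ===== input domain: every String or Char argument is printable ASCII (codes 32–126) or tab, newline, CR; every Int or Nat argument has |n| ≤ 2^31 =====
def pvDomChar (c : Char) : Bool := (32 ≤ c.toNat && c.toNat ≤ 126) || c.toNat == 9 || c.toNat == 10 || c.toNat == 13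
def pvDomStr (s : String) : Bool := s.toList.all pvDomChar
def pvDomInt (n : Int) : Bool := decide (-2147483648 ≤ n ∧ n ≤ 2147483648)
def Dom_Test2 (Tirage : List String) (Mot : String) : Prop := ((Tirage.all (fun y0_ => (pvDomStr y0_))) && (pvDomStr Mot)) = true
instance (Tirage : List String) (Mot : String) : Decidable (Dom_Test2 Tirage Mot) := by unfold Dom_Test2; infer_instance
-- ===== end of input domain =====

-- B replaces A's membership+remove loops by sort-then-two-pointer-merge multiset intersection counting (alternative algorithm; return value only, neither mutates its inputs).


-- ===== PORT A =====
-- helper Test(Tirage, Mot): loop over Mot's characters; `L.remove(k)` after the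
-- membership check is `L.erase s` (PySem.List.remove?_eq_some_erase).
def testGo : List String → List Char → Bool
  | _, [] => true
  | L, k :: ks =>
    let s := String.ofList [k]
    if L.contains s then testGo (L.erase s) ks else false

-- the joker-path loop of Test2: `comptage` accumulator over Mot's characters
def test2Count : List String → Int → List Char → Int
  | _, c, [] => c
  | L, c, k :: ks =>
    let s := String.ofList [k]
    if L.contains s then test2Count (L.erase s) c ks else test2Count L (c + 1) ks

def Test2 (Tirage : List String) (Mot : String) : Bool :=
  if !(Tirage.contains "?") then
    testGo Tirage Mot.toList
  else
    if test2Count Tirage 0 Mot.toList ≤ 1 then true else false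

-- ===== PORT B =====
-- the two-pointer merge loop of Source B: advancing an index past the head is dropping the head
def mergeCount : List String → List String → Nat
  | [], _ => 0
  | _ :: _, [] => 0
  | a :: as, b :: bs =>
    if a = b then mergeCount as bs + 1
    else if a < b then mergeCount as (b :: bs)
    else mergeCount (a :: as) bs

def Test2_alt (Tirage : List String) (Mot : String) : Bool :=
  let draw := PySem.List.sorted Tirage (fun x => x) false
  let word := PySem.List.sorted (Mot.toList.map (fun k => String.ofList [k])) (fun x => x) false
  let matched := mergeCount draw word
  decide ((Mot.toList.length : Int) - (matched : Int) ≤ (if Tirage.contains "?" then 1 else 0))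

-- ===== PRECONDITION & SPEC =====
def Spec_Test2 (Tirage : List String) (Mot : String) (out : Bool) : Prop := out = Test2_alt Tirage Mot
instance (Tirage : List String) (Mot : String) (out : Bool) : Decidable (Spec_Test2 Tirage Mot out) := by unfold Spec_Test2; infer_instance

-- ===== CLAIM (what is proved, stated in full; the proofs are below) =====
def Claim_equal_Test2 : Prop := ∀ (Tirage : List String) (Mot : String), Dom_Test2 Tirage Mot → Spec_Test2 Tirage Mot (Test2 Tirage Mot)

-- ===== LEMMAS AND PROOFS =====

theorem test2Count_nonneg (ks : List Char) : ∀ (L : List String) (c : Int),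
    c ≤ test2Count L c ks := by
  induction ks with
  | nil => intro L c; simp [test2Count]
  | cons k ks ih =>
    intro L c
    simp only [test2Count]
    split
    · exact ih _ c
    · have := ih L (c + 1); omega

theorem test2Count_shift (ks : List Char) : ∀ (L : List String) (c : Int),
    test2Count L c ks = c + test2Count L 0 ks := by
  induction ks with
  | nil => intro L c; simp [test2Count]
  | cons k ks ih =>
    intro L c
    simp only [test2Count]
    split
    · rw [ih _ c]
    · rw [ih _ (c + 1), ih _ (0 + 1)]; ring

theorem testGo_eq_count (ks : List Char) : ∀ (L : List String),
    testGo L ks = decide (test2Count L 0 ks = 0) := by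
  induction ks with
  | nil => intro L; simp [testGo, test2Count]
  | cons k ks ih =>
    intro L
    simp only [testGo, test2Count]
    split
    · exact ih _
    · have h1 := test2Count_shift ks L (0 + 1)
      have h2 := test2Count_nonneg ks L 0
      symm
      simp only [decide_eq_false_iff_not]
      omega

-- A's greedy remove-loop misses exactly |Mot| minus the multiset-intersection size
theorem test2Count_eq_sub_inter (ks : List Char) : ∀ (L : List String),
    test2Count L 0 ks
      = (ks.length : Int)
        - (Multiset.card ((ks.map (fun k => String.ofList [k]) : Multiset String) ∩ (L : Multiset String)) : Int) := by
  induction ks with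
  | nil => intro L; simp [test2Count]
  | cons k ks ih =>
    intro L
    simp only [test2Count]
    have hco : ((k :: ks).map (fun k => String.ofList [k]) : Multiset String)
        = (String.ofList [k]) ::ₘ (ks.map (fun k => String.ofList [k]) : Multiset String) := by
      simp
    by_cases hc : (String.ofList [k]) ∈ L
    · have hmem : L.contains (String.ofList [k]) = true := by simpa using hc
      simp only [hmem, if_true]
      rw [ih (L.erase (String.ofList [k]))]
      rw [hco, Multiset.cons_inter_of_pos _ (by simpa using hc), Multiset.coe_erase]
      simp only [Multiset.card_cons, List.length_cons]
      push_cast; ring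
    · have hmem : L.contains (String.ofList [k]) = false := by simpa using hc
      simp only [hmem, Bool.false_eq_true, if_false]
      rw [test2Count_shift, ih L]
      rw [hco, Multiset.cons_inter_of_neg _ (by simpa using hc)]
      simp only [List.length_cons]
      push_cast; ring

-- B's two-pointer merge on sorted lists counts the multiset intersection
theorem mergeCount_eq_inter : ∀ (l1 l2 : List String),
    l1.Pairwise (· ≤ ·) → l2.Pairwise (· ≤ ·) →
    mergeCount l1 l2 = Multiset.card ((l2 : Multiset String) ∩ (l1 : Multiset String)) := by
  intro l1
  induction l1 with
  | nil => intro l2 _ _; simp [mergeCount]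
  | cons a as ih =>
    intro l2
    induction l2 with
    | nil => intro _ _; simp [mergeCount]
    | cons b bs ih2 =>
      intro h1 h2
      have h1' := (List.pairwise_cons.mp h1).2
      have h2' := (List.pairwise_cons.mp h2).2
      have e1 : ((a :: as : List String) : Multiset String) = a ::ₘ (as : Multiset String) := by simp
      have e2 : ((b :: bs : List String) : Multiset String) = b ::ₘ (bs : Multiset String) := by simp
      simp only [mergeCount]
      by_cases hab : a = b
      · subst hab
        rw [if_pos rfl, ih bs h1' h2', e1, e2,
            Multiset.cons_inter_of_pos _ (by simp), Multiset.erase_cons_head]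
        simp
      · by_cases hlt : a < b
        · -- a < b ≤ every element of bs, so a does not occur in b :: bs
          have hnot : a ∉ (b :: bs) := by
            intro hmem
            rcases List.mem_cons.mp hmem with h | h
            · exact hab h
            · exact absurd rfl (ne_of_lt (lt_of_lt_of_le hlt ((List.pairwise_cons.mp h2).1 a h)))
          have hstep : ((b :: bs : List String) : Multiset String) ∩ ((a :: as : List String) : Multiset String)
              = ((b :: bs : List String) : Multiset String) ∩ (as : Multiset String) := by
            rw [Multiset.inter_comm, e1,
                Multiset.cons_inter_of_neg _ (by rw [Multiset.mem_coe]; exact hnot),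
                Multiset.inter_comm]
          rw [if_neg hab, if_pos hlt, hstep, ih (b :: bs) h1' h2]
        · -- b < a ≤ every element of as, so b does not occur in a :: as
          have hba : b < a := lt_of_le_of_ne (le_of_not_gt hlt) (Ne.symm hab)
          have hnot : b ∉ (a :: as) := by
            intro hmem
            rcases List.mem_cons.mp hmem with h | h
            · exact hab h.symm
            · exact absurd rfl (ne_of_lt (lt_of_lt_of_le hba ((List.pairwise_cons.mp h1).1 b h)))
          rw [if_neg hab, if_neg hlt, ih2 h1 h2', e2,
              Multiset.cons_inter_of_neg _ (by rw [Multiset.mem_coe]; exact hnot)]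

-- sorting does not change the multisets B intersects
theorem mergeCount_sorted_eq (Tirage : List String) (ks : List Char) :
    mergeCount (PySem.List.sorted Tirage (fun x => x) false)
               (PySem.List.sorted (ks.map (fun k => String.ofList [k])) (fun x => x) false)
      = Multiset.card ((ks.map (fun k => String.ofList [k]) : Multiset String) ∩ (Tirage : Multiset String)) := by
  rw [mergeCount_eq_inter _ _
        (by simpa using PySem.List.sorted_pairwise Tirage (fun x => x))
        (by simpa using PySem.List.sorted_pairwise (ks.map (fun k => String.ofList [k])) (fun x => x))]
  rw [Multiset.coe_eq_coe.mpr (PySem.List.sorted_perm Tirage (fun x => x) false),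
      Multiset.coe_eq_coe.mpr (PySem.List.sorted_perm (ks.map (fun k => String.ofList [k])) (fun x => x) false)]

-- ===== VERDICT (by name: the statement is the Claim_ definition above) =====
theorem Test2_spec : Claim_equal_Test2 := by
  intro Tirage Mot _
  unfold Spec_Test2 Test2 Test2_alt
  simp only
  rw [mergeCount_sorted_eq Tirage Mot.toList]
  have hA := test2Count_eq_sub_inter Mot.toList Tirage
  by_cases hq : Tirage.contains "?" = true
  · simp only [hq, Bool.not_true, Bool.false_eq_true, if_false, if_true]
    split <;> rename_i h <;> symm
    · simp only [decide_eq_true_iff]; omega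
    · simp only [decide_eq_false_iff_not]; omega
  · have hq' : Tirage.contains "?" = false := by simp_all
    simp only [hq', Bool.not_false, if_true, if_false, Bool.false_eq_true]
    rw [testGo_eq_count, hA]
    have hnn := test2Count_nonneg Mot.toList Tirage 0
    rw [hA] at hnn
    exact decide_eq_decide.mpr (by omega)
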